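-- pv_equiv track=rewrite | github.com/vynijales/ufersa-compilador-tonto | src/ui/widgets/graph_viewer/graph_viewer.py | _find_root_node
-- ===== SOURCE A (Python) =====
-- def _find_root_node(graph_data):
--     """
--     Encontra o nó raiz (que não é filho de nenhum outro nó).
--     """
--     all_children = set()
--     for node_data in graph_data:
--         all_children.update(node_data.get("connections", []))
--
--     # O nó raiz é aquele que não aparece como filho de ninguém
--     for i in range(len(graph_data)):
--         if i not in all_children:
--             return i
--
--     # Se não encontrar, retorna 0 como fallback
--     return 0
-- ===== SOURCE B (Python) =====
-- def _find_root_node(graph_data):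
--     n = len(graph_data)
--     children = sorted({c for node in graph_data
--                        for c in node.get("connections", [])
--                        if 0 <= c < n})
--     i = 0
--     for c in children:
--         if c == i:
--             i += 1
--         elif c > i:
--             break
--     return i if i < n else 0
-- ===== Notes on version B (the rewrite author's own statement) =====
-- stated objective: alternative
-- what changed: Instead of scanning range(n) against a membership set, B collects the in-range child indices, sorts them, and walks the sorted list once to find the first gap (a sort-based mex), with the same i<n fallback to 0.
import Mathlib
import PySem

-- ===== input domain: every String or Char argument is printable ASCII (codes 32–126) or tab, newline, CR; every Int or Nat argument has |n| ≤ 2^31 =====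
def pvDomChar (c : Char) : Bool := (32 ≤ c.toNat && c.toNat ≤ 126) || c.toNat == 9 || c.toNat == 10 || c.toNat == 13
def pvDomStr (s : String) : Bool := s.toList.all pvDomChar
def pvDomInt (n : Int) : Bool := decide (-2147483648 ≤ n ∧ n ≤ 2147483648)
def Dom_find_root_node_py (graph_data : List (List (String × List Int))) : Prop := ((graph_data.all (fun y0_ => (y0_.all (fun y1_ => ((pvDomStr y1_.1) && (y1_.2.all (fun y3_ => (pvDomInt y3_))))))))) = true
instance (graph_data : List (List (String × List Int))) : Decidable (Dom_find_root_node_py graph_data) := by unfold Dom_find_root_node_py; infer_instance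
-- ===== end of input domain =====

-- B replaces A's set-then-range-scan with a sort-based mex: collect the in-range
-- children, sort them, and walk the sorted list for the first gap (objective: alternative).


-- ===== PORT A =====
-- node_data.get("connections", [])
def connOf (node : List (String × List Int)) : List Int :=
  PySem.Dict.getD (PySem.Dict.mk node) "connections" []

-- the 'for i in range(...): if i not in all_children: return i' loop with fallback 0
def findRootLoopA (s : PySem.Set Int) : List Int → Int
  | [] => 0
  | i :: rest => if PySem.Set.contains s i then findRootLoopA s rest else i

def find_root_node_py (graph_data : List (List (String × List Int))) : Int :=
  let all_children : PySem.Set Int :=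
    graph_data.foldl (fun s node_data => PySem.Set.update s (connOf node_data)) PySem.Set.empty
  findRootLoopA all_children (PySem.List.pyRange 0 graph_data.length 1)

-- ===== PORT B =====
-- the set comprehension {c for node in graph_data for c in node.get("connections", []) if 0 <= c < n}
def childrenSetB (n : Int) (graph_data : List (List (String × List Int))) : PySem.Set Int :=
  graph_data.foldl
    (fun s node =>
      (connOf node).foldl (fun s c => if 0 ≤ c ∧ c < n then PySem.Set.add s c else s) s)
    PySem.Set.empty

-- 'for c in children: if c == i: i += 1 elif c > i: break'
def mexLoopB : Int → List Int → Int
  | i, [] => i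
  | i, c :: rest => if c = i then mexLoopB (i + 1) rest else if i < c then i else mexLoopB i rest

def find_root_node_py_alt (graph_data : List (List (String × List Int))) : Int :=
  let n : Int := graph_data.length
  let children : List Int := PySem.List.sorted (childrenSetB n graph_data) (fun x => x) false
  let i := mexLoopB 0 children
  if i < n then i else 0

-- ===== PRECONDITION & SPEC =====
def Spec_find_root_node_py (graph_data : List (List (String × List Int))) (out : Int) : Prop := out = find_root_node_py_alt graph_data
instance (graph_data : List (List (String × List Int))) (out : Int) : Decidable (Spec_find_root_node_py graph_data out) := by unfold Spec_find_root_node_py; infer_instance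

-- ===== CLAIM =====
def Claim_equal_find_root_node_py : Prop := ∀ (graph_data : List (List (String × List Int))), Dom_find_root_node_py graph_data → Spec_find_root_node_py graph_data (find_root_node_py graph_data)

-- ===== LEMMAS AND PROOFS =====

-- membership in A's folded set = some node lists x as a child
theorem mem_childrenA (graph_data : List (List (String × List Int))) (s : PySem.Set Int) (x : Int) :
    x ∈ graph_data.foldl (fun s node_data => PySem.Set.update s (connOf node_data)) s
    ↔ x ∈ s ∨ ∃ node ∈ graph_data, x ∈ connOf node := by
  induction graph_data generalizing s with
  | nil => simp
  | cons node rest ih =>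
    simp only [List.foldl_cons, ih, PySem.Set.mem_update, List.mem_cons]
    constructor
    · rintro (⟨h | h⟩ | ⟨n, hn, hx⟩)
      · exact Or.inl h
      · exact Or.inr ⟨node, Or.inl rfl, h⟩
      · exact Or.inr ⟨n, Or.inr hn, hx⟩
    · rintro (h | ⟨n, (rfl | hn), hx⟩)
      · exact Or.inl (Or.inl h)
      · exact Or.inl (Or.inr hx)
      · exact Or.inr ⟨n, hn, hx⟩

-- membership in the inner conditional-add fold of B
theorem mem_innerB (n : Int) (cs : List Int) (s : PySem.Set Int) (x : Int) :
    x ∈ cs.foldl (fun s c => if 0 ≤ c ∧ c < n then PySem.Set.add s c else s) s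
    ↔ x ∈ s ∨ (x ∈ cs ∧ 0 ≤ x ∧ x < n) := by
  induction cs generalizing s with
  | nil => simp
  | cons c rest ih =>
    simp only [List.foldl_cons, List.mem_cons]
    by_cases hc : 0 ≤ c ∧ c < n
    · simp only [if_pos hc, ih, PySem.Set.mem_add]
      constructor
      · rintro (⟨h | rfl⟩ | ⟨h1, h2⟩)
        · exact Or.inl h
        · exact Or.inr ⟨Or.inl rfl, hc⟩
        · exact Or.inr ⟨Or.inr h1, h2⟩
      · rintro (h | ⟨(rfl | h1), h2⟩)
        · exact Or.inl (Or.inl h)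
        · exact Or.inl (Or.inr rfl)
        · exact Or.inr ⟨h1, h2⟩
    · simp only [if_neg hc, ih]
      constructor
      · rintro (h | ⟨h1, h2⟩)
        · exact Or.inl h
        · exact Or.inr ⟨Or.inr h1, h2⟩
      · rintro (h | ⟨(rfl | h1), h2⟩)
        · exact Or.inl h
        · exact absurd h2 hc
        · exact Or.inr ⟨h1, h2⟩

theorem mem_childrenSetB (n : Int) (graph_data : List (List (String × List Int))) (x : Int) :
    x ∈ childrenSetB n graph_data
    ↔ (∃ node ∈ graph_data, x ∈ connOf node) ∧ 0 ≤ x ∧ x < n := by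
  unfold childrenSetB
  suffices h : ∀ s : PySem.Set Int,
      x ∈ graph_data.foldl
        (fun s node =>
          (connOf node).foldl (fun s c => if 0 ≤ c ∧ c < n then PySem.Set.add s c else s) s) s
      ↔ x ∈ s ∨ ((∃ node ∈ graph_data, x ∈ connOf node) ∧ 0 ≤ x ∧ x < n) by
    rw [h PySem.Set.empty]; simp [PySem.Set.empty]
  intro s
  induction graph_data generalizing s with
  | nil => simp
  | cons node rest ih =>
    simp only [List.foldl_cons, ih, mem_innerB, List.mem_cons]
    constructor
    · rintro (⟨h | ⟨h1, h2⟩⟩ | ⟨⟨m, hm, hx⟩, h2⟩)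
      · exact Or.inl h
      · exact Or.inr ⟨⟨node, Or.inl rfl, h1⟩, h2⟩
      · exact Or.inr ⟨⟨m, Or.inr hm, hx⟩, h2⟩
    · rintro (h | ⟨⟨m, (rfl | hm), hx⟩, h2⟩)
      · exact Or.inl (Or.inl h)
      · exact Or.inl (Or.inr ⟨hx, h2⟩)
      · exact Or.inr ⟨⟨m, hm, hx⟩, h2⟩

theorem nodup_innerB (n : Int) (cs : List Int) (s : PySem.Set Int) (hs : s.Nodup) :
    (cs.foldl (fun s c => if 0 ≤ c ∧ c < n then PySem.Set.add s c else s) s).Nodup := by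
  induction cs generalizing s with
  | nil => exact hs
  | cons c rest ih =>
    simp only [List.foldl_cons]
    by_cases hc : 0 ≤ c ∧ c < n
    · exact ih _ (by rw [if_pos hc]; exact PySem.Set.nodup_add s c hs)
    · exact ih _ (by rw [if_neg hc]; exact hs)

theorem nodup_childrenSetB (n : Int) (graph_data : List (List (String × List Int))) :
    (childrenSetB n graph_data).Nodup := by
  unfold childrenSetB
  suffices h : ∀ s : PySem.Set Int, s.Nodup →
      (graph_data.foldl
        (fun s node =>
          (connOf node).foldl (fun s c => if 0 ≤ c ∧ c < n then PySem.Set.add s c else s) s)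
        s).Nodup from h PySem.Set.empty List.nodup_nil
  intro s hs
  induction graph_data generalizing s with
  | nil => exact hs
  | cons node rest ih => exact ih _ (nodup_innerB n (connOf node) s hs)

-- the mex loop on a strictly increasing list of elements ≥ i computes the least missing value ≥ i
theorem mexLoopB_spec (l : List Int) (hl : l.Pairwise (· < ·)) :
    ∀ i, (∀ c ∈ l, i ≤ c) →
      i ≤ mexLoopB i l ∧ mexLoopB i l ∉ l ∧ ∀ j, i ≤ j → j < mexLoopB i l → j ∈ l := by
  induction l with
  | nil => intro i _; exact ⟨le_refl i, by simp, fun j h1 h2 => absurd (lt_of_le_of_lt h1 h2) (lt_irrefl i)⟩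
  | cons c rest ih =>
    intro i hge
    have hc : i ≤ c := hge c (List.mem_cons_self ..)
    have hcr : ∀ x ∈ rest, c < x := by
      intro x hx; exact (List.pairwise_cons.mp hl).1 x hx
    by_cases hic : c = i
    · subst hic
      have h1 : ∀ x ∈ rest, c + 1 ≤ x := fun x hx => hcr x hx
      obtain ⟨ha, hb, hc3⟩ := ih (List.pairwise_cons.mp hl).2 (c + 1) h1
      rw [show mexLoopB c (c :: rest) = mexLoopB (c + 1) rest by simp [mexLoopB]]
      refine ⟨by omega, ?_, ?_⟩
      · intro hmem
        rcases List.mem_cons.mp hmem with h | h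
        · omega
        · exact hb h
      · intro j hj1 hj2
        by_cases hjc : j = c
        · exact hjc ▸ List.mem_cons_self ..
        · exact List.mem_cons_of_mem _ (hc3 j (by omega) hj2)
    · have hlt : i < c := lt_of_le_of_ne hc (fun h => hic h.symm)
      rw [show mexLoopB i (c :: rest) = i by simp [mexLoopB, hic, hlt]]
      refine ⟨le_refl i, ?_, fun j h1 h2 => by omega⟩
      intro hmem
      rcases List.mem_cons.mp hmem with h | h
      · omega
      · have := hcr i h; omega

-- strictly increasing sorted children list
theorem pairwise_sortedB (n : Int) (graph_data : List (List (String × List Int))) :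
    (PySem.List.sorted (childrenSetB n graph_data) (fun x => x) false).Pairwise (· < ·) := by
  have h1 : (PySem.List.sorted (childrenSetB n graph_data) (fun x => x) false).Pairwise (· ≤ ·) :=
    PySem.List.sorted_pairwise _ _
  have h2 : (PySem.List.sorted (childrenSetB n graph_data) (fun x => x) false).Nodup :=
    (PySem.List.sorted_perm _ _ _).nodup_iff.mpr (nodup_childrenSetB n graph_data)
  exact (h1.and h2).imp (fun h => lt_of_le_of_ne h.1 h.2)

-- A's scan returns m when m is the least in-range index missing from A's set
theorem scanA_hit (s : PySem.Set Int) (n m : Int) (hmn : m < n)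
    (hmiss : ¬ PySem.Set.contains s m = true)
    (hbelow : ∀ j, 0 ≤ j → j < m → PySem.Set.contains s j = true) :
    ∀ (k : Nat) (lo : Int), 0 ≤ lo → lo + k = m →
      findRootLoopA s (PySem.List.pyRange lo n 1) = m := by
  intro k
  induction k with
  | zero =>
    intro lo hlo hk
    have : lo = m := by omega
    subst this
    rw [PySem.List.pyRange_one_cons (by omega)]
    simp only [findRootLoopA]
    rw [if_neg hmiss]
  | succ k ih =>
    intro lo hlo hk
    rw [PySem.List.pyRange_one_cons (by omega)]
    have hin : PySem.Set.contains s lo = true := hbelow lo hlo (by omega)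
    simp only [findRootLoopA, hin, if_pos]
    exact ih (lo + 1) (by omega) (by omega)

-- A's scan falls through to 0 when every index of the range is in the set
theorem scanA_all (s : PySem.Set Int) (n : Int)
    (hall : ∀ j, 0 ≤ j → j < n → PySem.Set.contains s j = true) :
    ∀ (k : Nat) (lo : Int), 0 ≤ lo → lo + k = n →
      findRootLoopA s (PySem.List.pyRange lo n 1) = 0 := by
  intro k
  induction k with
  | zero =>
    intro lo hlo hk
    rw [PySem.List.pyRange_one_eq_nil (by omega)]
    rfl
  | succ k ih =>
    intro lo hlo hk
    rw [PySem.List.pyRange_one_cons (by omega)]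
    simp only [findRootLoopA, hall lo hlo (by omega), if_pos]
    exact ih (lo + 1) (by omega) (by omega)

-- ===== VERDICT =====
theorem find_root_node_py_spec : Claim_equal_find_root_node_py := by
  intro gd _
  unfold Spec_find_root_node_py find_root_node_py find_root_node_py_alt
  set n : Int := (gd.length : Int) with hn
  set sA : PySem.Set Int :=
    gd.foldl (fun s node_data => PySem.Set.update s (connOf node_data)) PySem.Set.empty with hsA
  set children : List Int := PySem.List.sorted (childrenSetB n gd) (fun x => x) false with hch
  have hmemA : ∀ x, x ∈ sA ↔ ∃ node ∈ gd, x ∈ connOf node := by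
    intro x; rw [hsA, mem_childrenA]; simp [PySem.Set.empty]
  have hmemC : ∀ x, x ∈ children ↔ (∃ node ∈ gd, x ∈ connOf node) ∧ 0 ≤ x ∧ x < n := by
    intro x; rw [hch, PySem.List.mem_sorted, mem_childrenSetB]
  set m : Int := mexLoopB 0 children with hm
  obtain ⟨hm0, hmnot, hmlow⟩ :=
    mexLoopB_spec children (pairwise_sortedB n gd) 0
      (fun c hc => ((hmemC c).mp hc).2.1)
  have hbelow : ∀ j, 0 ≤ j → j < m → PySem.Set.contains sA j = true := by
    intro j h1 h2
    rw [PySem.Set.contains_iff, hmemA]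
    exact ((hmemC j).mp (hmlow j h1 h2)).1
  by_cases hcase : m < n
  · rw [if_pos hcase]
    have hmiss : ¬ PySem.Set.contains sA m = true := by
      rw [PySem.Set.contains_iff, hmemA]
      intro h
      exact hmnot ((hmemC m).mpr ⟨h, hm0, hcase⟩)
    exact scanA_hit sA n m hcase hmiss hbelow m.toNat 0 (le_refl 0) (by omega)
  · rw [if_neg hcase]
    have hall : ∀ j, 0 ≤ j → j < n → PySem.Set.contains sA j = true :=
      fun j h1 h2 => hbelow j h1 (by omega)
    exact scanA_all sA n hall n.toNat 0 (le_refl 0) (by omega)
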